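-- pv_equiv track=rewrite | github.com/Taeleus/tt_scanner_buddy | resource_identifier.py | colorize_resources
-- ===== SOURCE A (Python) =====
-- def colorize_resources(text):
--     """Wrap specific resource names in HTML span tags for colorization."""
--     replacements = {
--         "Quantanium": "<span class='quantanium'>Quantanium</span>",
--         "Taranite": "<span class='taranite'>Taranite</span>",
--         "Bexalite": "<span class='bexalite'>Bexalite</span>",
--         "Hadanite": "<span class='hadanite'>Hadanite</span>",
--         "Gold": "<span class='gold'>Gold</span>"
--     }
--     for original, colored in replacements.items():
--         text = text.replace(original, colored)
--     return text
-- ===== SOURCE B (Python) =====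
-- def colorize_resources(text):
--     """Wrap specific resource names in HTML span tags for colorization."""
--     names = ["Quantanium", "Taranite", "Bexalite", "Hadanite", "Gold"]
--     out = []
--     i = 0
--     n = len(text)
--     while i < n:
--         for name in names:
--             if text.startswith(name, i):
--                 out.append("<span class='" + name.lower() + "'>" + name + "</span>")
--                 i += len(name)
--                 break
--         else:
--             out.append(text[i])
--             i += 1
--     return "".join(out)
-- ===== Notes on version B (the rewrite author's own statement) =====
-- stated objective: alternative
-- what changed: Replaces five sequential full-text str.replace passes with one left-to-right scan that tries each resource name at the current position and emits its span (or the character) as it goes.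
import Mathlib
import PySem

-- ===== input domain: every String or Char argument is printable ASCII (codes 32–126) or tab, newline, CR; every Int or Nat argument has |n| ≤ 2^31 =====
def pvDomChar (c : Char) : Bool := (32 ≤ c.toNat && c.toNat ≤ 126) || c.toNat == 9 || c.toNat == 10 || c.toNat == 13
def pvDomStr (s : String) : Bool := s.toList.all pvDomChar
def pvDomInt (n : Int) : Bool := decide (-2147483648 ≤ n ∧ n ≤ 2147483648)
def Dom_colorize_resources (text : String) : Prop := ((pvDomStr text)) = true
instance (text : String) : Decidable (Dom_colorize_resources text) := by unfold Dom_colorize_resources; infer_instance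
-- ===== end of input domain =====

-- B replaces A's five sequential full-text replace passes by one left-to-right scan
-- that tries each resource name at the current position (objective: alternative).

-- ===== PORT A =====
-- A iterates over the dict's items in insertion order, doing text = text.replace(original, colored).
def colorize_resources (text : String) : String :=
  let replacements : List (String × String) :=
    [("Quantanium", "<span class='quantanium'>Quantanium</span>"),
     ("Taranite", "<span class='taranite'>Taranite</span>"),
     ("Bexalite", "<span class='bexalite'>Bexalite</span>"),
     ("Hadanite", "<span class='hadanite'>Hadanite</span>"),
     ("Gold", "<span class='gold'>Gold</span>")]
  replacements.foldl (fun t p => PySem.Str.replace t p.1 p.2) text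

-- ===== PORT B =====
-- B's names list (Source B: names = [...]), as lists of code points.
def pvNamesB : List (List Char) :=
  ["Quantanium".toList, "Taranite".toList, "Bexalite".toList, "Hadanite".toList, "Gold".toList]

-- Source B inner for-loop: first name matching at the current position, with its span.
def pvTryNames : List (List Char) → List Char → Option (List Char × Nat)
  | [], _ => none
  | nm :: rest, l =>
    if nm.isPrefixOf l then
      some ("<span class='".toList ++ PySem.Chars.lower nm ++ "'>".toList ++ nm ++ "</span>".toList, nm.length)
    else pvTryNames rest l

-- Source B while-loop: one pass over the text, emitting a span or the current character.
def pvScanB : List Char → List Char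
  | [] => []
  | c :: t =>
    match pvTryNames pvNamesB (c :: t) with
    | some (sp, len) => sp ++ pvScanB (t.drop (len - 1))
    | none => c :: pvScanB t
termination_by l => l.length
decreasing_by all_goals simp

def colorize_resources_alt (text : String) : String := String.ofList (pvScanB text.toList)

-- ===== PRECONDITION & SPEC =====
def Spec_colorize_resources (text : String) (out : String) : Prop := out = colorize_resources_alt text
instance (text : String) (out : String) : Decidable (Spec_colorize_resources text out) := by unfold Spec_colorize_resources; infer_instance

-- ===== CLAIM (what is proved, stated in full; the proofs are below) =====
def Claim_equal_colorize_resources : Prop := ∀ (text : String), Dom_colorize_resources text → Spec_colorize_resources text (colorize_resources text)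

-- ===== LEMMAS AND PROOFS =====

-- A clean recursive form of Python str.replace (for nonempty old).
def pvRepl (old new : List Char) : List Char → List Char
  | [] => []
  | c :: t =>
    if old.isPrefixOf (c :: t) then new ++ pvRepl old new (t.drop (old.length - 1))
    else c :: pvRepl old new t
termination_by l => l.length
decreasing_by all_goals simp

theorem pvRepl_nil (old new : List Char) : pvRepl old new [] = [] := by simp [pvRepl]

theorem pvRepl_cons (old new : List Char) (c : Char) (t : List Char)
    (h : ¬ old.isPrefixOf (c :: t)) : pvRepl old new (c :: t) = c :: pvRepl old new t := by
  rw [pvRepl]; simp [h]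

theorem pvRepl_head (old new X : List Char) (ho : old ≠ []) :
    pvRepl old new (old ++ X) = new ++ pvRepl old new X := by
  obtain ⟨o, ot, rfl⟩ := List.exists_cons_of_ne_nil ho
  rw [show (o :: ot) ++ X = o :: (ot ++ X) by simp, pvRepl]
  have hp : (o :: ot).isPrefixOf (o :: (ot ++ X)) = true := by
    simp [List.isPrefixOf_iff_prefix]
  simp [hp, List.drop_left']

theorem pvRepl_skip (old new : List Char) (h : Char) (hh : old.head? = some h) :
    ∀ (b X : List Char), h ∉ b → pvRepl old new (b ++ X) = b ++ pvRepl old new X := by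
  intro b
  induction b with
  | nil => intro X _; simp
  | cons c b' ih =>
    intro X hb
    obtain ⟨o, ot, rfl⟩ : ∃ o ot, old = o :: ot := by
      cases old with
      | nil => simp at hh
      | cons a as => exact ⟨a, as, rfl⟩
    have ho : o = h := by simpa using hh
    have hne : ¬ (o :: ot).isPrefixOf (c :: (b' ++ X)) := by
      intro hp
      have : o = c := by
        have := List.isPrefixOf_iff_prefix.mp hp
        rcases this with ⟨u, hu⟩
        injection hu with h1 _
      exact hb (by simp [← this, ho])
    rw [show (c :: b') ++ X = c :: (b' ++ X) by simp, pvRepl_cons _ _ _ _ hne,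
        ih X (fun hm => hb (by simp [hm]))]
    simp

-- If w contains no '<' and the inserted span starts with '<', a prefix of the
-- replaced text was already a prefix of the original text.
theorem pvProtect (old s : List Char) (hs : s.head? = some '<') :
    ∀ (t w : List Char), '<' ∉ w → w <+: pvRepl old s t → w <+: t := by
  intro t
  induction t with
  | nil => simp [pvRepl_nil]
  | cons c u ih =>
    intro w hw
    by_cases hp : old.isPrefixOf (c :: u)
    · rw [pvRepl]
      simp only [hp, if_true]
      intro hpre
      cases w with
      | nil => exact List.nil_prefix
      | cons a w' =>
        exfalso
        obtain ⟨s0, s', rfl⟩ : ∃ s0 s', s = s0 :: s' := by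
          cases s with
          | nil => simp at hs
          | cons x xs => exact ⟨x, xs, rfl⟩
        have hs0 : s0 = '<' := by simpa using hs
        rw [show (s0 :: s') ++ pvRepl (old) (s0 :: s') (u.drop (old.length - 1)) =
              s0 :: (s' ++ pvRepl (old) (s0 :: s') (u.drop (old.length - 1))) by simp,
            List.cons_prefix_cons] at hpre
        exact hw (by simp [hpre.1, hs0])
    · rw [pvRepl_cons _ _ _ _ hp]
      intro hpre
      cases w with
      | nil => exact List.nil_prefix
      | cons a w' =>
        rw [List.cons_prefix_cons] at hpre ⊢
        exact ⟨hpre.1, ih w' (by intro hm; exact hw (by simp [hm])) hpre.2⟩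

-- Chars.replace agrees with pvRepl for nonempty old.
theorem pvReplaceGo_eq (old new : List Char) (ho : old ≠ []) :
    ∀ (fuel : Nat) (l acc : List Char), l.length ≤ fuel →
      PySem.Chars.replace.go old new fuel l acc = acc.reverse ++ pvRepl old new l := by
  intro fuel
  induction fuel with
  | zero =>
    intro l acc hl
    have : l = [] := List.length_eq_zero_iff.mp (Nat.le_zero.mp hl)
    subst this
    simp [PySem.Chars.replace.go, pvRepl_nil]
  | succ n ih =>
    intro l acc hl
    cases l with
    | nil => simp [PySem.Chars.replace.go, pvRepl_nil]
    | cons c t =>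
      rw [PySem.Chars.replace.go]
      by_cases hp : old.isPrefixOf (c :: t)
      · simp only [hp, if_true]
        have hdrop : (c :: t).drop old.length = t.drop (old.length - 1) := by
          obtain ⟨o, ot, rfl⟩ := List.exists_cons_of_ne_nil ho
          simp
        have hol : 1 ≤ old.length := List.length_pos_of_ne_nil ho
        rw [hdrop, ih (t.drop (old.length - 1)) (new.reverse ++ acc) (by simp at hl ⊢; omega)]
        rw [pvRepl]
        simp [hp]
      · simp only [hp]
        rw [ih t (c :: acc) (by simp at hl; omega), pvRepl_cons _ _ _ _ hp]
        simp

theorem pvReplace_eq (s old new : List Char) (ho : old ≠ []) :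
    PySem.Chars.replace s old new = pvRepl old new s := by
  rw [PySem.Chars.replace]
  simp [List.isEmpty_iff, ho]
  exact pvReplaceGo_eq old new ho s.length s [] (le_refl _)

-- Abbreviations for the five names and spans (as code-point lists).
def pvN1 : List Char := "Quantanium".toList
def pvN2 : List Char := "Taranite".toList
def pvN3 : List Char := "Bexalite".toList
def pvN4 : List Char := "Hadanite".toList
def pvN5 : List Char := "Gold".toList
def pvS1 : List Char := "<span class='quantanium'>Quantanium</span>".toList
def pvS2 : List Char := "<span class='taranite'>Taranite</span>".toList
def pvS3 : List Char := "<span class='bexalite'>Bexalite</span>".toList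
def pvS4 : List Char := "<span class='hadanite'>Hadanite</span>".toList
def pvS5 : List Char := "<span class='gold'>Gold</span>".toList

def pvChain (l : List Char) : List Char :=
  pvRepl pvN5 pvS5 (pvRepl pvN4 pvS4 (pvRepl pvN3 pvS3 (pvRepl pvN2 pvS2 (pvRepl pvN1 pvS1 l))))

-- Each sequential-replace pass either matches a block at its head or passes over it
-- (the block never contains the pass's first letter).
theorem pvChain_block1 (rest : List Char) :
    pvChain (pvN1 ++ rest) = pvS1 ++ pvChain rest := by
  unfold pvChain
  rw [pvRepl_head pvN1 pvS1 _ (by decide)]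
  rw [pvRepl_skip pvN2 pvS2 'T' (by decide) pvS1 _ (by decide)]
  rw [pvRepl_skip pvN3 pvS3 'B' (by decide) pvS1 _ (by decide)]
  rw [pvRepl_skip pvN4 pvS4 'H' (by decide) pvS1 _ (by decide)]
  rw [pvRepl_skip pvN5 pvS5 'G' (by decide) pvS1 _ (by decide)]

theorem pvChain_block2 (rest : List Char) :
    pvChain (pvN2 ++ rest) = pvS2 ++ pvChain rest := by
  unfold pvChain
  rw [pvRepl_skip pvN1 pvS1 'Q' (by decide) pvN2 _ (by decide)]
  rw [pvRepl_head pvN2 pvS2 _ (by decide)]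
  rw [pvRepl_skip pvN3 pvS3 'B' (by decide) pvS2 _ (by decide)]
  rw [pvRepl_skip pvN4 pvS4 'H' (by decide) pvS2 _ (by decide)]
  rw [pvRepl_skip pvN5 pvS5 'G' (by decide) pvS2 _ (by decide)]

theorem pvChain_block3 (rest : List Char) :
    pvChain (pvN3 ++ rest) = pvS3 ++ pvChain rest := by
  unfold pvChain
  rw [pvRepl_skip pvN1 pvS1 'Q' (by decide) pvN3 _ (by decide)]
  rw [pvRepl_skip pvN2 pvS2 'T' (by decide) pvN3 _ (by decide)]
  rw [pvRepl_head pvN3 pvS3 _ (by decide)]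
  rw [pvRepl_skip pvN4 pvS4 'H' (by decide) pvS3 _ (by decide)]
  rw [pvRepl_skip pvN5 pvS5 'G' (by decide) pvS3 _ (by decide)]

theorem pvChain_block4 (rest : List Char) :
    pvChain (pvN4 ++ rest) = pvS4 ++ pvChain rest := by
  unfold pvChain
  rw [pvRepl_skip pvN1 pvS1 'Q' (by decide) pvN4 _ (by decide)]
  rw [pvRepl_skip pvN2 pvS2 'T' (by decide) pvN4 _ (by decide)]
  rw [pvRepl_skip pvN3 pvS3 'B' (by decide) pvN4 _ (by decide)]
  rw [pvRepl_head pvN4 pvS4 _ (by decide)]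
  rw [pvRepl_skip pvN5 pvS5 'G' (by decide) pvS4 _ (by decide)]

theorem pvChain_block5 (rest : List Char) :
    pvChain (pvN5 ++ rest) = pvS5 ++ pvChain rest := by
  unfold pvChain
  rw [pvRepl_skip pvN1 pvS1 'Q' (by decide) pvN5 _ (by decide)]
  rw [pvRepl_skip pvN2 pvS2 'T' (by decide) pvN5 _ (by decide)]
  rw [pvRepl_skip pvN3 pvS3 'B' (by decide) pvN5 _ (by decide)]
  rw [pvRepl_skip pvN4 pvS4 'H' (by decide) pvN5 _ (by decide)]
  rw [pvRepl_head pvN5 pvS5 _ (by decide)]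

-- When no name matches at the head, all five passes keep the head character.
theorem pvChain_cons (c : Char) (t : List Char)
    (h1 : ¬ pvN1.isPrefixOf (c :: t) = true) (h2 : ¬ pvN2.isPrefixOf (c :: t) = true)
    (h3 : ¬ pvN3.isPrefixOf (c :: t) = true) (h4 : ¬ pvN4.isPrefixOf (c :: t) = true)
    (h5 : ¬ pvN5.isPrefixOf (c :: t) = true) :
    pvChain (c :: t) = c :: pvChain t := by
  have P : ∀ (old s : List Char), s.head? = some '<' → ∀ (w : List Char), '<' ∉ w → ∀ (u : List Char),
      w.isPrefixOf (pvRepl old s u) = true → w.isPrefixOf u = true := by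
    intro old s hs w hw u h
    exact List.isPrefixOf_iff_prefix.mpr (pvProtect old s hs u w hw (List.isPrefixOf_iff_prefix.mp h))
  have q2 : ¬ pvN2.isPrefixOf (pvRepl pvN1 pvS1 (c :: t)) = true :=
    fun h => h2 (P _ _ (by decide) _ (by decide) _ h)
  have q3 : ¬ pvN3.isPrefixOf (pvRepl pvN2 pvS2 (pvRepl pvN1 pvS1 (c :: t))) = true :=
    fun h => h3 (P _ _ (by decide) _ (by decide) _ (P _ _ (by decide) _ (by decide) _ h))
  have q4 : ¬ pvN4.isPrefixOf (pvRepl pvN3 pvS3 (pvRepl pvN2 pvS2 (pvRepl pvN1 pvS1 (c :: t)))) = true :=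
    fun h => h4 (P _ _ (by decide) _ (by decide) _ (P _ _ (by decide) _ (by decide) _
      (P _ _ (by decide) _ (by decide) _ h)))
  have q5 : ¬ pvN5.isPrefixOf (pvRepl pvN4 pvS4 (pvRepl pvN3 pvS3 (pvRepl pvN2 pvS2 (pvRepl pvN1 pvS1 (c :: t))))) = true :=
    fun h => h5 (P _ _ (by decide) _ (by decide) _ (P _ _ (by decide) _ (by decide) _
      (P _ _ (by decide) _ (by decide) _ (P _ _ (by decide) _ (by decide) _ h))))
  have e1 := pvRepl_cons pvN1 pvS1 c t h1
  rw [e1] at q2 q3 q4 q5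
  have e2 := pvRepl_cons pvN2 pvS2 c _ q2
  rw [e2] at q3 q4 q5
  have e3 := pvRepl_cons pvN3 pvS3 c _ q3
  rw [e3] at q4 q5
  have e4 := pvRepl_cons pvN4 pvS4 c _ q4
  rw [e4] at q5
  have e5 := pvRepl_cons pvN5 pvS5 c _ q5
  unfold pvChain
  rw [e1, e2, e3, e4, e5]

-- The main equivalence on lists: the five sequential replaces equal the single scan.
theorem pvMain : ∀ (n : Nat) (l : List Char), l.length ≤ n → pvChain l = pvScanB l := by
  intro n
  induction n with
  | zero =>
    intro l hl
    have : l = [] := List.length_eq_zero_iff.mp (Nat.le_zero.mp hl)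
    subst this
    unfold pvChain
    simp [pvRepl_nil, pvScanB]
  | succ n ih =>
    intro l hl
    cases l with
    | nil =>
      unfold pvChain
      simp [pvRepl_nil, pvScanB]
    | cons c t =>
      by_cases h1 : pvN1.isPrefixOf (c :: t) = true
      · obtain ⟨rest, hrest⟩ := List.isPrefixOf_iff_prefix.mp h1
        have hlen : rest.length ≤ n := by
          have hL := congrArg List.length hrest
          simp [pvN1] at hL
          simp at hl
          omega
        have hdrop : t.drop 9 = rest := by
          have hD := congrArg (List.drop 10) hrest
          simpa [pvN1] using hD.symm
        have htry : pvTryNames pvNamesB (c :: t) = some (pvS1, 10) := by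
          simp only [pvNamesB, pvTryNames]
          rw [if_pos (by simpa [pvN1] using h1)]
          decide
        have hscan : pvScanB (c :: t) = pvS1 ++ pvScanB (t.drop 9) := by
          rw [pvScanB, htry]
        rw [hscan, hdrop, ← hrest, pvChain_block1 rest, ih rest hlen]
      by_cases h2 : pvN2.isPrefixOf (c :: t) = true
      · obtain ⟨rest, hrest⟩ := List.isPrefixOf_iff_prefix.mp h2
        have hlen : rest.length ≤ n := by
          have hL := congrArg List.length hrest
          simp [pvN2] at hL
          simp at hl
          omega
        have hdrop : t.drop 7 = rest := by
          have hD := congrArg (List.drop 8) hrest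
          simpa [pvN2] using hD.symm
        have htry : pvTryNames pvNamesB (c :: t) = some (pvS2, 8) := by
          simp only [pvNamesB, pvTryNames]
          rw [if_neg (by simpa [pvN1] using h1)]
          rw [if_pos (by simpa [pvN2] using h2)]
          decide
        have hscan : pvScanB (c :: t) = pvS2 ++ pvScanB (t.drop 7) := by
          rw [pvScanB, htry]
        rw [hscan, hdrop, ← hrest, pvChain_block2 rest, ih rest hlen]
      by_cases h3 : pvN3.isPrefixOf (c :: t) = true
      · obtain ⟨rest, hrest⟩ := List.isPrefixOf_iff_prefix.mp h3
        have hlen : rest.length ≤ n := by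
          have hL := congrArg List.length hrest
          simp [pvN3] at hL
          simp at hl
          omega
        have hdrop : t.drop 7 = rest := by
          have hD := congrArg (List.drop 8) hrest
          simpa [pvN3] using hD.symm
        have htry : pvTryNames pvNamesB (c :: t) = some (pvS3, 8) := by
          simp only [pvNamesB, pvTryNames]
          rw [if_neg (by simpa [pvN1] using h1)]
          rw [if_neg (by simpa [pvN2] using h2)]
          rw [if_pos (by simpa [pvN3] using h3)]
          decide
        have hscan : pvScanB (c :: t) = pvS3 ++ pvScanB (t.drop 7) := by
          rw [pvScanB, htry]
        rw [hscan, hdrop, ← hrest, pvChain_block3 rest, ih rest hlen]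
      by_cases h4 : pvN4.isPrefixOf (c :: t) = true
      · obtain ⟨rest, hrest⟩ := List.isPrefixOf_iff_prefix.mp h4
        have hlen : rest.length ≤ n := by
          have hL := congrArg List.length hrest
          simp [pvN4] at hL
          simp at hl
          omega
        have hdrop : t.drop 7 = rest := by
          have hD := congrArg (List.drop 8) hrest
          simpa [pvN4] using hD.symm
        have htry : pvTryNames pvNamesB (c :: t) = some (pvS4, 8) := by
          simp only [pvNamesB, pvTryNames]
          rw [if_neg (by simpa [pvN1] using h1)]
          rw [if_neg (by simpa [pvN2] using h2)]
          rw [if_neg (by simpa [pvN3] using h3)]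
          rw [if_pos (by simpa [pvN4] using h4)]
          decide
        have hscan : pvScanB (c :: t) = pvS4 ++ pvScanB (t.drop 7) := by
          rw [pvScanB, htry]
        rw [hscan, hdrop, ← hrest, pvChain_block4 rest, ih rest hlen]
      by_cases h5 : pvN5.isPrefixOf (c :: t) = true
      · obtain ⟨rest, hrest⟩ := List.isPrefixOf_iff_prefix.mp h5
        have hlen : rest.length ≤ n := by
          have hL := congrArg List.length hrest
          simp [pvN5] at hL
          simp at hl
          omega
        have hdrop : t.drop 3 = rest := by
          have hD := congrArg (List.drop 4) hrest
          simpa [pvN5] using hD.symm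
        have htry : pvTryNames pvNamesB (c :: t) = some (pvS5, 4) := by
          simp only [pvNamesB, pvTryNames]
          rw [if_neg (by simpa [pvN1] using h1)]
          rw [if_neg (by simpa [pvN2] using h2)]
          rw [if_neg (by simpa [pvN3] using h3)]
          rw [if_neg (by simpa [pvN4] using h4)]
          rw [if_pos (by simpa [pvN5] using h5)]
          decide
        have hscan : pvScanB (c :: t) = pvS5 ++ pvScanB (t.drop 3) := by
          rw [pvScanB, htry]
        rw [hscan, hdrop, ← hrest, pvChain_block5 rest, ih rest hlen]
      · have hnone : pvTryNames pvNamesB (c :: t) = none := by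
          simp only [pvNamesB, pvTryNames]
          rw [if_neg (by simpa [pvN1] using h1)]
          rw [if_neg (by simpa [pvN2] using h2)]
          rw [if_neg (by simpa [pvN3] using h3)]
          rw [if_neg (by simpa [pvN4] using h4)]
          rw [if_neg (by simpa [pvN5] using h5)]
        have hscan : pvScanB (c :: t) = c :: pvScanB t := by
          rw [pvScanB, hnone]
        rw [hscan, pvChain_cons c t h1 h2 h3 h4 h5, ih t (by simp at hl; omega)]

-- Str.replace at the String level, for a nonempty pattern.
theorem pvStrReplace_eq (s o n : String) (ho : o.toList ≠ []) :
    PySem.Str.replace s o n = String.ofList (pvRepl o.toList n.toList s.toList) := by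
  have : PySem.Str.replace s o n = String.ofList (PySem.Chars.replace s.toList o.toList n.toList) := rfl
  rw [this, pvReplace_eq _ _ _ ho]

-- ===== VERDICT (by name: the statement is the Claim_ definition above) =====
theorem colorize_resources_spec : Claim_equal_colorize_resources := by
  unfold Claim_equal_colorize_resources Spec_colorize_resources
  intro text _
  unfold colorize_resources colorize_resources_alt
  simp only [List.foldl]
  rw [pvStrReplace_eq _ _ _ (by decide), pvStrReplace_eq _ _ _ (by decide),
      pvStrReplace_eq _ _ _ (by decide), pvStrReplace_eq _ _ _ (by decide),
      pvStrReplace_eq _ _ _ (by decide)]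
  simp only [String.toList_ofList]
  have := pvMain text.toList.length text.toList (le_refl _)
  unfold pvChain at this
  rw [show pvN1 = "Quantanium".toList from rfl, show pvS1 = "<span class='quantanium'>Quantanium</span>".toList from rfl,
      show pvN2 = "Taranite".toList from rfl, show pvS2 = "<span class='taranite'>Taranite</span>".toList from rfl,
      show pvN3 = "Bexalite".toList from rfl, show pvS3 = "<span class='bexalite'>Bexalite</span>".toList from rfl,
      show pvN4 = "Hadanite".toList from rfl, show pvS4 = "<span class='hadanite'>Hadanite</span>".toList from rfl,
      show pvN5 = "Gold".toList from rfl, show pvS5 = "<span class='gold'>Gold</span>".toList from rfl] at this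
  rw [this]
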